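-- pv_equiv track=rewrite | github.com/DigitalGuilmon/dotfiles | wm-shared/.config/wm-shared/scripts/bin/system/pdsl_ls.py | import_block_range
-- ===== SOURCE A (Python) =====
-- from typing import Any
--
-- def strip_comments(line: str) -> str:
--     return line.split("#", 1)[0].rstrip()
--
-- def import_block_range(text: str) -> dict[str, Any] | None:
--     lines = text.splitlines()
--     matching = [index for index, line in enumerate(lines) if strip_comments(line).strip().startswith(("import ", "extends "))]
--     if not matching:
--         return None
--     start = matching[0]
--     end = matching[-1]
--     return make_range(start, 0, end, len(lines[end]) if end < len(lines) else 0)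
--
-- def make_range(start_line: int, start_char: int, end_line: int, end_char: int) -> dict[str, Any]:
--     return {
--         "start": {"line": start_line, "character": start_char},
--         "end": {"line": end_line, "character": end_char},
--     }
-- ===== SOURCE B (Python) =====
-- from typing import Any
--
--
-- def strip_comments(line: str) -> str:
--     return line.split("#", 1)[0].rstrip()
--
--
-- def _matches(line: str) -> bool:
--     return strip_comments(line).strip().startswith(("import ", "extends "))
--
--
-- def import_block_range(text: str) -> dict[str, Any] | None:
--     lines = text.splitlines()
--     start = None
--     for index in range(len(lines)):
--         if _matches(lines[index]):
--             start = index
--             break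
--     if start is None:
--         return None
--     offset = next(i for i, line in enumerate(reversed(lines)) if _matches(line))
--     end = len(lines) - 1 - offset
--     return make_range(start, 0, end, len(lines[end]))
--
--
-- def make_range(start_line: int, start_char: int, end_line: int, end_char: int) -> dict[str, Any]:
--     return {
--         "start": {"line": start_line, "character": start_char},
--         "end": {"line": end_line, "character": end_char},
--     }
-- ===== Notes on version B (the rewrite author's own statement) =====
-- stated objective: alternative
-- what changed: B never builds the list of all matching line indices: it scans forward with early exit for the first matching line and scans the reversed lines for the last one, instead of A's full enumerate-and-filter comprehension plus head/tail indexing.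
import Mathlib
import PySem

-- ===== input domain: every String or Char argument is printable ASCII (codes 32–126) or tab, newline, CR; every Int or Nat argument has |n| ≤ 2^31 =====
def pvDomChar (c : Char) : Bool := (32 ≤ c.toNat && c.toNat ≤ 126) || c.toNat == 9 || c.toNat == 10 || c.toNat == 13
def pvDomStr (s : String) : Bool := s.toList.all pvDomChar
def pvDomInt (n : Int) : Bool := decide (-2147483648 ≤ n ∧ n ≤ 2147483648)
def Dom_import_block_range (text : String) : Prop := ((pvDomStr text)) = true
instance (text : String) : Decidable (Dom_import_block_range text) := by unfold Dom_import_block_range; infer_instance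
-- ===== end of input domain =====

-- B avoids building A's list of all matching indices: it finds the first match by a forward
-- scan with early exit and the last match by scanning the reversed lines (return value only).

-- shared helper (same helper in both Pythons): line.split("#", 1)[0].rstrip()
def strip_comments_port (line : String) : String :=
  PySem.Str.rstrip (((PySem.Str.splitMax? line "#" 1).getD []).headD "")

-- the matching predicate, strip_comments(line).strip().startswith(("import ", "extends "))
def pvMatches (line : String) : Bool :=
  PySem.Str.startswith (PySem.Str.strip (strip_comments_port line)) "import " ||
  PySem.Str.startswith (PySem.Str.strip (strip_comments_port line)) "extends "

def make_range_port (start_line start_char end_line end_char : Int) :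
    List (String × List (String × Int)) :=
  [("start", [("line", start_line), ("character", start_char)]),
   ("end", [("line", end_line), ("character", end_char)])]

-- ===== PORT A =====
def import_block_range (text : String) : Option (List (String × List (String × Int))) :=
  let lines := PySem.Str.splitlines text
  let matching := (PySem.List.enumerate lines 0).filterMap
    (fun pr => if pvMatches pr.2 then some pr.1 else none)
  if matching = [] then none
  else
    let start := matching.headD 0
    let e := matching.getLastD 0
    some (make_range_port start 0 e
      (if e < PySem.List.len lines then PySem.Str.len (PySem.List.pyGetD lines e "") else 0))

-- ===== PORT B =====
-- forward scan with early exit: first index i ≥ n (counting from n along ls) whose line matches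
def firstMatchIdx : List String → Nat → Option Nat
  | [], _ => none
  | l :: ls, i => if pvMatches l then some i else firstMatchIdx ls (i + 1)

def import_block_range_alt (text : String) : Option (List (String × List (String × Int))) :=
  let lines := PySem.Str.splitlines text
  match firstMatchIdx lines 0 with
  | none => none
  | some s =>
    match firstMatchIdx lines.reverse 0 with
    | none => none  -- unreachable: a forward match exists
    | some off =>
      let e := lines.length - 1 - off
      some (make_range_port (↑s) 0 (↑e) (PySem.Str.len (lines.getD e "")))

-- ===== PRECONDITION & SPEC =====
def Spec_import_block_range (text : String) (out : Option (List (String × List (String × Int)))) : Prop := out = import_block_range_alt text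
instance (text : String) (out : Option (List (String × List (String × Int)))) : Decidable (Spec_import_block_range text out) := by unfold Spec_import_block_range; infer_instance

-- ===== CLAIM (what is proved, stated in full; the proofs are below) =====
def Claim_equal_import_block_range : Prop := ∀ (text : String), Dom_import_block_range text → Spec_import_block_range text (import_block_range text)

-- ===== LEMMAS AND PROOFS =====

-- proof helper: last matching index, found by a forward pass (bridges A's getLast? and B's reverse scan)
def lastMatchIdx : List String → Nat → Option Nat
  | [], _ => none
  | l :: ls, i =>
    match lastMatchIdx ls (i + 1) with
    | some j => some j
    | none => if pvMatches l then some i else none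

def pvMatching (ls : List String) (n : Int) : List Int :=
  (PySem.List.enumerate ls n).filterMap (fun pr => if pvMatches pr.2 then some pr.1 else none)

theorem pvMatching_cons (l : String) (ls : List String) (n : Int) :
    pvMatching (l :: ls) n =
      (if pvMatches l then [n] else []) ++ pvMatching ls (n + 1) := by
  simp only [pvMatching, PySem.List.enumerate, List.filterMap_cons]
  split_ifs with h <;> simp [h]

theorem head_eq_first (ls : List String) (n : Nat) :
    (pvMatching ls ↑n).head? = (firstMatchIdx ls n).map (fun j => (↑j : Int)) := by
  induction ls generalizing n with
  | nil => simp [pvMatching, PySem.List.enumerate, firstMatchIdx]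
  | cons l ls ih =>
    rw [pvMatching_cons]
    by_cases h : pvMatches l
    · simp [h, firstMatchIdx]
    · have := ih (n + 1)
      push_cast at this
      simp [h, firstMatchIdx, this]

theorem last_eq_lastIn (ls : List String) (n : Nat) :
    (pvMatching ls ↑n).getLast? = (lastMatchIdx ls n).map (fun j => (↑j : Int)) := by
  induction ls generalizing n with
  | nil => simp [pvMatching, PySem.List.enumerate, lastMatchIdx]
  | cons l ls ih =>
    rw [pvMatching_cons]
    have hih := ih (n + 1)
    push_cast at hih
    cases hlast : lastMatchIdx ls (n + 1 : Nat) with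
    | none =>
      rw [hlast] at hih; simp at hih
      by_cases h : pvMatches l <;>
        simp [h, lastMatchIdx, hlast, hih]
    | some j =>
      rw [hlast] at hih; simp at hih
      have hne : pvMatching ls (↑n + 1) ≠ [] := by
        intro hc; rw [hc] at hih; simp at hih
      rw [List.getLast?_append_of_ne_nil _ hne, hih]
      simp [lastMatchIdx, hlast]

theorem firstMatchIdx_bounds {ls : List String} {n j : Nat}
    (h : firstMatchIdx ls n = some j) : n ≤ j ∧ j < n + ls.length := by
  induction ls generalizing n with
  | nil => simp [firstMatchIdx] at h
  | cons l ls ih =>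
    simp only [firstMatchIdx] at h
    split_ifs at h with hm
    · cases h; simp only [List.length_cons]; omega
    · have := ih h
      simp only [List.length_cons]
      omega

theorem firstMatchIdx_append_none {xs : List String} (ys : List String) {n : Nat}
    (h : firstMatchIdx xs n = none) :
    firstMatchIdx (xs ++ ys) n = firstMatchIdx ys (n + xs.length) := by
  induction xs generalizing n with
  | nil => simp [firstMatchIdx]
  | cons l xs ih =>
    have harith : n + 1 + xs.length = n + (xs.length + 1) := by omega
    simp only [List.cons_append, firstMatchIdx] at h ⊢
    split_ifs at h ⊢ with hm
    rw [ih h, harith, List.length_cons]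

theorem firstMatchIdx_append_some {xs : List String} (ys : List String) {n j : Nat}
    (h : firstMatchIdx xs n = some j) :
    firstMatchIdx (xs ++ ys) n = some j := by
  induction xs generalizing n with
  | nil => simp [firstMatchIdx] at h
  | cons l xs ih =>
    simp only [List.cons_append, firstMatchIdx] at h ⊢
    split_ifs at h ⊢ with hm
    · exact h
    · exact ih h

theorem lastIn_eq_rev (ls : List String) (n : Nat) :
    lastMatchIdx ls n =
      (firstMatchIdx ls.reverse 0).map (fun j => n + (ls.length - 1 - j)) := by
  induction ls generalizing n with
  | nil => simp [lastMatchIdx, firstMatchIdx]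
  | cons l ls ih =>
    have hrev : (l :: ls).reverse = ls.reverse ++ [l] := by simp
    cases hf : firstMatchIdx ls.reverse 0 with
    | none =>
      have h2 : lastMatchIdx ls (n + 1) = none := by rw [ih, hf]; simp
      rw [hrev, firstMatchIdx_append_none [l] hf]
      simp only [lastMatchIdx, h2, List.length_reverse, Nat.zero_add]
      by_cases h : pvMatches l <;> simp [firstMatchIdx, h]
    | some j =>
      have hb := firstMatchIdx_bounds hf
      rw [List.length_reverse] at hb
      have h2 : lastMatchIdx ls (n + 1) = some ((n + 1) + (ls.length - 1 - j)) := by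
        rw [ih, hf]; simp
      rw [hrev, firstMatchIdx_append_some [l] hf]
      simp only [lastMatchIdx, h2, Option.map_some, List.length_cons]
      have harith : (n + 1) + (ls.length - 1 - j) = n + (ls.length + 1 - 1 - j) := by omega
      rw [harith]

theorem matching_nil_iff (ls : List String) :
    pvMatching ls 0 = [] ↔ firstMatchIdx ls 0 = none := by
  have h3 := head_eq_first ls 0
  push_cast at h3
  constructor
  · intro h
    rw [h] at h3
    cases hf : firstMatchIdx ls 0 with
    | none => rfl
    | some j => rw [hf] at h3; simp at h3
  · intro h
    rw [h] at h3; simp at h3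
    exact h3

theorem firstMatchIdx_rev_none (ls : List String) :
    firstMatchIdx ls.reverse 0 = none ↔ firstMatchIdx ls 0 = none := by
  have h2 := last_eq_lastIn ls 0
  push_cast at h2
  have hrev := lastIn_eq_rev ls 0
  constructor
  · intro h
    rw [h] at hrev; simp at hrev
    rw [hrev] at h2; simp at h2
    exact (matching_nil_iff ls).mp h2
  · intro h
    have hnil := (matching_nil_iff ls).mpr h
    rw [hnil] at h2; simp at h2
    rw [hrev] at h2
    cases hf : firstMatchIdx ls.reverse 0 with
    | none => rfl
    | some j => rw [hf] at h2; simp at h2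

-- ===== VERDICT (by name: the statement is the Claim_ definition above) =====
theorem import_block_range_spec : Claim_equal_import_block_range := by
  intro text _
  unfold Spec_import_block_range import_block_range import_block_range_alt
  set ls := PySem.Str.splitlines text with hls
  simp only
  have hmA : ((PySem.List.enumerate ls 0).filterMap
      (fun pr => if pvMatches pr.2 then some pr.1 else none)) = pvMatching ls 0 := rfl
  rw [hmA]
  cases hf : firstMatchIdx ls 0 with
  | none =>
    rw [(matching_nil_iff ls).mpr hf]
    simp
  | some s =>
    have hne0 : ¬ firstMatchIdx ls.reverse 0 = none := by
      rw [firstMatchIdx_rev_none, hf]; simp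
    cases hr : firstMatchIdx ls.reverse 0 with
    | none => exact absurd hr hne0
    | some off =>
      have hb := firstMatchIdx_bounds hr
      rw [List.length_reverse] at hb
      have hlen : 0 < ls.length := by omega
      have hlast : lastMatchIdx ls 0 = some (ls.length - 1 - off) := by
        rw [lastIn_eq_rev, hr]; simp
      have h2 := last_eq_lastIn ls 0
      push_cast at h2
      rw [hlast] at h2; simp at h2
      have h3 := head_eq_first ls 0
      push_cast at h3
      rw [hf] at h3; simp at h3
      have hmne : pvMatching ls 0 ≠ [] := by
        intro hc
        exact absurd ((matching_nil_iff ls).mp hc) (by rw [hf]; simp)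
      rw [if_neg hmne]
      have hhead : (pvMatching ls 0).headD 0 = (↑s : Int) := by
        rw [List.headD_eq_head?_getD, h3]; rfl
      have hlastD : (pvMatching ls 0).getLastD 0 = (↑(ls.length - 1 - off) : Int) := by
        rw [List.getLastD_eq_getLast?, h2]; rfl
      have hlt : (↑(ls.length - 1 - off) : Int) < PySem.List.len ls := by
        simp [PySem.List.len_eq]; omega
      rw [hhead, hlastD, if_pos hlt, PySem.List.pyGetD_natCast]
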